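-- pv_equiv track=rewrite | github.com/epfl-si/gdpr_digger | common.py | common_keys
-- ===== SOURCE A (Python) =====
-- def common_keys(data):
-- 	keys=[]
-- 	for d in data:
-- 		for k, v in d.items():
-- 			if v is not None and v != '':
-- 				keys.append(k)
-- 	keys = list(dict.fromkeys(keys))
-- 	return keys
-- ===== SOURCE B (Python) =====
-- def common_keys(data):
-- 	def fresh(d):
-- 		ks = []
-- 		for k, v in d.items():
-- 			if v is not None and v != '' and k not in ks:
-- 				ks.append(k)
-- 		return ks
--
-- 	def merge(xs, ys):
-- 		sx = set(xs)
-- 		return xs + [k for k in ys if k not in sx]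
--
-- 	def solve(xs):
-- 		if len(xs) == 0:
-- 			return []
-- 		if len(xs) == 1:
-- 			return fresh(xs[0])
-- 		mid = len(xs) // 2
-- 		return merge(solve(xs[:mid]), solve(xs[mid:]))
--
-- 	return solve(data)
-- ===== Notes on version B (the rewrite author's own statement) =====
-- stated objective: alternative
-- what changed: Divide-and-conquer: split the dict list in half, recursively collect each half's ordered unique non-empty keys, and merge by appending the right result filtered against a set of the left result, instead of appending all keys left-to-right and deduplicating afterwards with dict.fromkeys.
import Mathlib
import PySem

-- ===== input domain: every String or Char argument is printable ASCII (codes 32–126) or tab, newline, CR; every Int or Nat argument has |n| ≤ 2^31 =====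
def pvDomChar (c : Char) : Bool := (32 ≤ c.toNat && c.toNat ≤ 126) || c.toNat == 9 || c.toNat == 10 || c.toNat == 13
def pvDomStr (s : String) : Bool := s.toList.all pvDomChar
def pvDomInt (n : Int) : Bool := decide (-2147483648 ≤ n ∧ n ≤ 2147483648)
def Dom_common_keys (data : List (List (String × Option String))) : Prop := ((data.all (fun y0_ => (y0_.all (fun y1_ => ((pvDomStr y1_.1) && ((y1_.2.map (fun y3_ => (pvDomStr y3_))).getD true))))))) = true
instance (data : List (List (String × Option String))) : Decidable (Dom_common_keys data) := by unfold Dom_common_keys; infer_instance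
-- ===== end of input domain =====

-- B is divide-and-conquer: recurse on the two halves of the dict list and merge,
-- filtering the right half's keys against the left's — an alternative to A's append-all-then-dedup.


-- ===== PORT A =====
-- keys=[]; for d in data: for k,v in d.items(): if v is not None and v != '': keys.append(k)
-- keys = list(dict.fromkeys(keys))   (PySem.List.dedup = list(dict.fromkeys(..)))
def common_keys (data : List (List (String × Option String))) : List String :=
  let keys :=
    data.foldl (fun keys d =>
      d.foldl (fun keys kv =>
        if kv.2 ≠ none ∧ kv.2 ≠ some "" then keys ++ [kv.1] else keys) keys) []
  PySem.List.dedup keys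

-- ===== PORT B =====
-- fresh(d): ks=[]; for k,v in d.items(): if v is not None and v != '' and k not in ks: ks.append(k)
def freshB (d : List (String × Option String)) : List String :=
  d.foldl (fun ks kv =>
    if (kv.2 ≠ none ∧ kv.2 ≠ some "") ∧ ¬ ks.contains kv.1 then ks ++ [kv.1] else ks) []

-- merge(xs, ys): sx = set(xs); return xs + [k for k in ys if k not in sx]
def mergeB (xs ys : List String) : List String :=
  xs ++ ys.filter (fun k => !(PySem.Set.contains (PySem.Set.ofList xs) k))

-- solve(xs): [] / fresh(xs[0]) / merge(solve(xs[:mid]), solve(xs[mid:])), mid = len(xs)//2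
-- (mid satisfies 0 ≤ mid ≤ len, so the slices xs[:mid] / xs[mid:] are exactly take / drop)
def solveB (xs : List (List (String × Option String))) : List String :=
  if xs.length = 0 then []
  else if xs.length = 1 then freshB xs.headI
  else mergeB (solveB (xs.take (xs.length / 2))) (solveB (xs.drop (xs.length / 2)))
termination_by xs.length
decreasing_by
  · simp only [List.length_take]; omega
  · simp only [List.length_drop]; omega

def common_keys_alt (data : List (List (String × Option String))) : List String :=
  solveB data

-- ===== PRECONDITION & SPEC =====
def Spec_common_keys (data : List (List (String × Option String))) (out : List String) : Prop := out = common_keys_alt data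
instance (data : List (List (String × Option String))) (out : List String) : Decidable (Spec_common_keys data out) := by unfold Spec_common_keys; infer_instance

-- ===== CLAIM (what is proved, stated in full; the proofs are below) =====
def Claim_equal_common_keys : Prop := ∀ (data : List (List (String × Option String))), Dom_common_keys data → Spec_common_keys data (common_keys data)

-- ===== LEMMAS AND PROOFS =====

-- A's inner append-if loop from an accumulator acc appends after acc
lemma inner_from (l : List (String × Option String)) (acc : List String) :
    l.foldl (fun ks kv =>
        if kv.2 ≠ none ∧ kv.2 ≠ some "" then ks ++ [kv.1] else ks) acc
    = acc ++ l.foldl (fun ks kv =>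
        if kv.2 ≠ none ∧ kv.2 ≠ some "" then ks ++ [kv.1] else ks) [] := by
  induction l generalizing acc with
  | nil => simp
  | cons kv l ih =>
    simp only [List.foldl_cons]
    by_cases h : kv.2 ≠ none ∧ kv.2 ≠ some ""
    · rw [if_pos h, if_pos h, ih (acc ++ [kv.1]), ih ([] ++ [kv.1])]; simp
    · rw [if_neg h, if_neg h]; exact ih acc

-- likewise A's outer loop
lemma outer_from (data : List (List (String × Option String))) (acc : List String) :
    data.foldl (fun keys d =>
      d.foldl (fun ks kv =>
        if kv.2 ≠ none ∧ kv.2 ≠ some "" then ks ++ [kv.1] else ks) keys) acc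
    = acc ++ data.foldl (fun keys d =>
      d.foldl (fun ks kv =>
        if kv.2 ≠ none ∧ kv.2 ≠ some "" then ks ++ [kv.1] else ks) keys) [] := by
  induction data generalizing acc with
  | nil => simp
  | cons d data ih =>
    simp only [List.foldl_cons]
    rw [ih, inner_from d acc,
        ih (d.foldl (fun ks kv => if kv.2 ≠ none ∧ kv.2 ≠ some "" then ks ++ [kv.1] else ks) [])]
    simp

-- B's guarded append step is the conditional PySem.Set.add step
lemma fresh_step (ks : List String) (kv : String × Option String) :
    (if (kv.2 ≠ none ∧ kv.2 ≠ some "") ∧ ¬ ks.contains kv.1 then ks ++ [kv.1] else ks)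
    = (if kv.2 ≠ none ∧ kv.2 ≠ some "" then PySem.Set.add ks kv.1 else ks) := by
  by_cases h : kv.2 ≠ none ∧ kv.2 ≠ some ""
  · simp [h, PySem.Set.add, PySem.Set.contains]
  · simp [h]

-- freshB d is the ordered dedup of A's inner key list for d
lemma fresh_eq_ofList (d : List (String × Option String)) :
    freshB d = PySem.Set.ofList (d.foldl (fun ks kv =>
        if kv.2 ≠ none ∧ kv.2 ≠ some "" then ks ++ [kv.1] else ks) []) := by
  have gen : ∀ (l : List (String × Option String)) (s : List String),
      l.foldl (fun ks kv =>
        if (kv.2 ≠ none ∧ kv.2 ≠ some "") ∧ ¬ ks.contains kv.1 then ks ++ [kv.1] else ks) s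
      = l.foldl (fun ks kv =>
        if kv.2 ≠ none ∧ kv.2 ≠ some "" then PySem.Set.add ks kv.1 else ks) s := by
    intro l s
    simp only [fresh_step]
  have set_side : ∀ (l : List (String × Option String)) (ks : List String),
      PySem.Set.ofList (l.foldl (fun ks kv =>
          if kv.2 ≠ none ∧ kv.2 ≠ some "" then ks ++ [kv.1] else ks) ks)
      = l.foldl (fun t kv =>
          if kv.2 ≠ none ∧ kv.2 ≠ some "" then PySem.Set.add t kv.1 else t)
          (PySem.Set.ofList ks) := by
    intro l
    induction l with
    | nil => intro ks; rfl
    | cons kv l ih =>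
      intro ks
      simp only [List.foldl_cons]
      by_cases h : kv.2 ≠ none ∧ kv.2 ≠ some ""
      · simp only [if_pos h]
        have hadd : PySem.Set.add (PySem.Set.ofList ks) kv.1
            = PySem.Set.ofList (ks ++ [kv.1]) := by
          rw [PySem.Set.ofList_eq_foldl, PySem.Set.ofList_eq_foldl, List.foldl_append]
          rfl
        rw [hadd]; exact ih (ks ++ [kv.1])
      · simp only [if_neg h, ih]
  rw [freshB, gen, set_side]
  rfl

-- merging two deduped halves is the dedup of the concatenation
lemma merge_ofList (a b : List String) :
    mergeB (PySem.Set.ofList a) (PySem.Set.ofList b) = PySem.Set.ofList (a ++ b) := by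
  unfold mergeB
  rw [PySem.Set.ofList_ofList, ← PySem.Set.update_eq_append_filter, ← PySem.Set.ofList_append]

-- A's flattened key list distributes over append of the dict list
lemma flat_append (a b : List (List (String × Option String))) :
    (a ++ b).foldl (fun keys d =>
      d.foldl (fun ks kv =>
        if kv.2 ≠ none ∧ kv.2 ≠ some "" then ks ++ [kv.1] else ks) keys) []
    = a.foldl (fun keys d =>
        d.foldl (fun ks kv =>
          if kv.2 ≠ none ∧ kv.2 ≠ some "" then ks ++ [kv.1] else ks) keys) []
      ++ b.foldl (fun keys d =>
        d.foldl (fun ks kv =>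
          if kv.2 ≠ none ∧ kv.2 ≠ some "" then ks ++ [kv.1] else ks) keys) [] := by
  rw [List.foldl_append, outer_from]

-- solveB computes the ordered dedup of A's flattened key list
lemma solve_eq (xs : List (List (String × Option String))) :
    solveB xs = PySem.Set.ofList (xs.foldl (fun keys d =>
      d.foldl (fun ks kv =>
        if kv.2 ≠ none ∧ kv.2 ≠ some "" then ks ++ [kv.1] else ks) keys) []) := by
  induction xs using solveB.induct with
  | case1 xs h0 =>
    have : xs = [] := List.length_eq_zero_iff.mp h0
    subst this; rw [solveB]; rfl
  | case2 xs h0 h1 =>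
    obtain ⟨d, hd⟩ : ∃ d, xs = [d] := List.length_eq_one_iff.mp h1
    subst hd
    rw [solveB]
    simp only [List.length_cons, List.length_nil, List.headI]
    rw [fresh_eq_ofList]
    rfl
  | case3 xs h0 h1 ih1 ih2 =>
    rw [solveB]
    simp only [if_neg h0, if_neg h1]
    rw [ih1, ih2, merge_ofList, ← flat_append, List.take_append_drop]

-- ===== VERDICT (by name: the statement is the Claim_ definition above) =====
theorem common_keys_spec : Claim_equal_common_keys := by
  intro data _
  unfold Spec_common_keys common_keys common_keys_alt
  simp only [PySem.List.dedup_eq_ofList]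
  exact (solve_eq data).symm
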